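-- pv_equiv track=rewrite | github.com/victorgarmann/lab6 | dna_fragment_match.py | best_alignment
-- ===== SOURCE A (Python) =====
-- def best_alignment(genome,pattern):
--     length_p = 0
--     length_g = 0
--     overlap = 0
--     splittet_p = list(pattern)
--     splittet_g = list(genome)
--     length_p = len(splittet_p)
--     length_g = len(splittet_g)
--     forrigeverdi = 0
--     best_pos = 0
--     diff = length_g - length_p
--     for i in range(diff + 1):
--         overlap = 0
--         for pos in range(length_p):
--             if splittet_p[pos] == splittet_g[pos + i]:
--                 overlap += 1
--         if overlap > forrigeverdi:
--             forrigeverdi = overlap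
--             best_pos = i
--     return best_pos
-- ===== SOURCE B (Python) =====
-- def best_alignment(genome, pattern):
--     diff = len(genome) - len(pattern)
--     # inverted index: character -> sorted list of its positions in pattern
--     idx = {}
--     for p, ch in enumerate(pattern):
--         idx.setdefault(ch, []).append(p)
--     # scatter: each matching pair (genome pos j, pattern pos p) inside the
--     # window j - diff <= p <= j votes for shift j - p
--     tally = {}
--     for j, ch in enumerate(genome):
--         ps = idx.get(ch, [])
--         # binary search for the first position >= j - diff
--         lo, hi = 0, len(ps)
--         while lo < hi:
--             mid = (lo + hi) // 2
--             if ps[mid] < j - diff: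
--                 lo = mid + 1
--             else:
--                 hi = mid
--         while lo < len(ps) and ps[lo] <= j:
--             i = j - ps[lo]
--             tally[i] = tally.get(i, 0) + 1
--             lo += 1
--     # first shift with strictly maximal positive vote count (else 0)
--     best_pos = 0
--     best_val = 0
--     for i in range(diff + 1):
--         v = tally.get(i, 0)
--         if v > best_val:
--             best_val = v
--             best_pos = i
--     return best_pos
-- ===== Notes on version B (the rewrite author's own statement) =====
-- stated objective: alternative
-- what changed: Replaces A's per-shift rescan of the whole pattern by an inverted index of pattern positions per character plus a single pass over the genome that binary-searches each character's position list to the valid shift window and tallies one vote per matching pair, followed by a separate argmax scan over the tally.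
import Mathlib
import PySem

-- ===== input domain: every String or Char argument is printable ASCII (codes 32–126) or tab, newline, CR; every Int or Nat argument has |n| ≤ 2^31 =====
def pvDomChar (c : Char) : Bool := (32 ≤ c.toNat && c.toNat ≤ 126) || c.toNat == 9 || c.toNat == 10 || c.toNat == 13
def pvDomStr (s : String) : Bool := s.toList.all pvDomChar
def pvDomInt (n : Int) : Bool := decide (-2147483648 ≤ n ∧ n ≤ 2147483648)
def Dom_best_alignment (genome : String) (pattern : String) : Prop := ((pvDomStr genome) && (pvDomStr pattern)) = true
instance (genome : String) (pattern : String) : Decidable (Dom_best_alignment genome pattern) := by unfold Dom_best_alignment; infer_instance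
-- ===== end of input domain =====

-- B is an alternative algorithm: an inverted index of pattern positions per character,
-- binary-searched to the valid shift window while one pass over the genome tallies a vote
-- per matching pair, then a separate argmax scan (A instead rescans the pattern per shift).

-- ===== PORT A =====
-- inner loop of A: number of positions where pattern matches genome at shift i
def baOverlap (pt g : List Char) (i : Int) : Int :=
  (PySem.List.pyRange 0 (pt.length : Int) 1).foldl
    (fun ov pos =>
      if PySem.List.pyGetD pt pos ' ' == PySem.List.pyGetD g (pos + i) ' ' then ov + 1 else ov)
    0

def best_alignment (genome : String) (pattern : String) : Int :=
  let splittet_p := pattern.toList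
  let splittet_g := genome.toList
  let length_p : Int := (splittet_p.length : Int)
  let length_g : Int := (splittet_g.length : Int)
  let diff := length_g - length_p
  let res := (PySem.List.pyRange 0 (diff + 1) 1).foldl
    (fun (s : Int × Int) i =>
      let overlap := baOverlap splittet_p splittet_g i
      if overlap > s.1 then (overlap, i) else s)
    ((0 : Int), (0 : Int))
  res.2

-- ===== PORT B =====
-- idx.setdefault(ch, []).append(p)  for p, ch in enumerate(pattern)
def bbIdx (pt : List Char) : PySem.Dict Char (List Int) :=
  (PySem.List.enumerate pt 0).foldl
    (fun d pc => d.modify pc.2 [] (· ++ [pc.1])) PySem.Dict.empty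

-- while lo < hi: mid = (lo+hi)//2; if ps[mid] < target: lo = mid+1 else: hi = mid
def bbLower (ps : List Int) (target : Int) (lo hi : Nat) : Nat :=
  if _h : lo < hi then
    let mid := (lo + hi) / 2
    if PySem.List.pyGetD ps (mid : Int) 0 < target then bbLower ps target (mid + 1) hi
    else bbLower ps target lo mid
  else lo
termination_by hi - lo
decreasing_by all_goals omega

-- while lo < len(ps) and ps[lo] <= j: tally[j-ps[lo]] = tally.get(j-ps[lo], 0) + 1; lo += 1
def bbScan (ps : List Int) (j : Int) (t : PySem.Dict Int Int) (lo : Nat) : PySem.Dict Int Int :=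
  if _h : lo < ps.length ∧ PySem.List.pyGetD ps (lo : Int) 0 ≤ j then
    bbScan ps j (t.modify (j - PySem.List.pyGetD ps (lo : Int) 0) 0 (· + 1)) (lo + 1)
  else t
termination_by ps.length - lo
decreasing_by omega

-- tally[i] = tally.get(i, 0) + 1 for each in-window matching pair voting for shift i = j - p
def bbTally (g : List Char) (idx : PySem.Dict Char (List Int)) (diff : Int) : PySem.Dict Int Int :=
  (PySem.List.enumerate g 0).foldl
    (fun t jc =>
      let ps := idx.getD jc.2 []
      bbScan ps jc.1 t (bbLower ps (jc.1 - diff) 0 ps.length))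
    PySem.Dict.empty

def best_alignment_alt (genome : String) (pattern : String) : Int :=
  let diff : Int := (genome.toList.length : Int) - (pattern.toList.length : Int)
  let idx := bbIdx pattern.toList
  let tally := bbTally genome.toList idx diff
  let res := (PySem.List.pyRange 0 (diff + 1) 1).foldl
    (fun (s : Int × Int) i =>
      let v := tally.getD i 0
      if v > s.2 then (i, v) else s)
    ((0 : Int), (0 : Int))
  res.1

-- ===== PRECONDITION & SPEC =====
def Spec_best_alignment (genome : String) (pattern : String) (out : Int) : Prop := out = best_alignment_alt genome pattern
instance (genome : String) (pattern : String) (out : Int) : Decidable (Spec_best_alignment genome pattern out) := by unfold Spec_best_alignment; infer_instance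

-- ===== CLAIM (what is proved, stated in full; the proofs are below) =====
def Claim_equal_best_alignment : Prop := ∀ (genome : String) (pattern : String), Dom_best_alignment genome pattern → Spec_best_alignment genome pattern (best_alignment genome pattern)

-- ===== LEMMAS AND PROOFS =====

-- positions of character c in the pattern, in order (what bbIdx stores under key c)
def pvPos (pt : List Char) (c : Char) : List Int :=
  (((PySem.List.enumerate pt 0).map Prod.swap).filter (fun q => q.1 == c)).map (fun q => q.2)

theorem bbIdx_getD (pt : List Char) (c : Char) : (bbIdx pt).getD c [] = pvPos pt c := by
  unfold bbIdx pvPos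
  rw [show (fun (d : PySem.Dict Char (List Int)) (pc : Int × Char) => d.modify pc.2 [] (· ++ [pc.1]))
        = (fun d pc => (fun (d : PySem.Dict Char (List Int)) (p : Char × Int) =>
            d.modify p.1 [] (· ++ [p.2])) d (Prod.swap pc)) from rfl,
      ← List.foldl_map (f := Prod.swap)
        (g := fun (d : PySem.Dict Char (List Int)) (p : Char × Int) => d.modify p.1 [] (· ++ [p.2])),
      PySem.Dict.getD_foldl_modify_append, PySem.Dict.getD_empty]
  rfl

theorem mem_pvPos (pt : List Char) (c : Char) (p : Int) :
    p ∈ pvPos pt c ↔ 0 ≤ p ∧ p < (pt.length : Int) ∧ PySem.List.pyGetD pt p ' ' = c := by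
  unfold pvPos
  simp only [List.mem_map, List.mem_filter, PySem.List.mem_enumerate_iff]
  constructor
  · rintro ⟨q, ⟨⟨x, ⟨k, hk, hx⟩, hq⟩, hc⟩, hp⟩
    subst hx; subst hq
    simp only [Prod.swap_prod_mk] at hc hp
    subst hp
    have hk' : ((0 : Int) + k) < (pt.length : Int) := by omega
    refine ⟨by omega, hk', ?_⟩
    rw [PySem.List.pyGetD_eq_getElem pt ' ' (by omega) hk']
    have : ((0 : Int) + (k : Int)).toNat = k := by omega
    simp only [this]
    exact beq_iff_eq.mp hc
  · rintro ⟨h0, hlt, hget⟩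
    have hk : p.toNat < pt.length := by omega
    refine ⟨(c, p), ⟨⟨((0 : Int) + p.toNat, pt[p.toNat]), ⟨p.toNat, hk, rfl⟩, ?_⟩, by simp⟩, rfl⟩
    rw [PySem.List.pyGetD_eq_getElem pt ' ' h0 hlt] at hget
    simp only [Prod.swap_prod_mk, hget]
    congr 1
    omega

theorem nodup_pvPos (pt : List Char) (c : Char) : (pvPos pt c).Nodup := by
  unfold pvPos
  have h1 : ((PySem.List.enumerate pt 0).map Prod.swap).Pairwise
      (fun (p q : Char × Int) => p.2 < q.2) :=
    (PySem.List.pairwise_lt_enumerate pt 0).map Prod.swap (fun a b hab => by simpa using hab)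
  have h2 : ((((PySem.List.enumerate pt 0).map Prod.swap).filter
      (fun q => q.1 == c)).map (fun q => q.2)).Pairwise (· < ·) :=
    List.Pairwise.map (R := fun (p q : Char × Int) => p.2 < q.2) (S := fun (a b : Int) => a < b)
      (fun (q : Char × Int) => q.2) (fun a b hab => hab) (h1.filter (fun q => q.1 == c))
  exact h2.imp ne_of_lt

-- the flattened list of shift votes cast by B's nested scatter loop
def pvBig (g pt : List Char) (diff : Int) : List Int :=
  (PySem.List.enumerate g 0).flatMap (fun jc =>
    ((pvPos pt jc.2).filter
        (fun p => decide (0 ≤ jc.1 - p ∧ jc.1 - p ≤ diff))).map (fun p => jc.1 - p))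

-- pvPos is strictly increasing
theorem pairwise_pvPos (pt : List Char) (c : Char) : (pvPos pt c).Pairwise (· < ·) := by
  unfold pvPos
  have h1 : ((PySem.List.enumerate pt 0).map Prod.swap).Pairwise
      (fun (p q : Char × Int) => p.2 < q.2) :=
    (PySem.List.pairwise_lt_enumerate pt 0).map Prod.swap (fun a b hab => by simpa using hab)
  exact List.Pairwise.map (R := fun (p q : Char × Int) => p.2 < q.2) (S := fun (a b : Int) => a < b)
    (fun (q : Char × Int) => q.2) (fun a b hab => hab) (h1.filter (fun q => q.1 == c))

-- the binary search finds a split point of the predicate (· < target) on a sorted list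
theorem bbLower_spec (ps : List Int) (target : Int) (lo hi : Nat)
    (hsort : ps.Pairwise (· < ·)) (hhi : hi ≤ ps.length) (hlohi : lo ≤ hi)
    (h1 : ∀ i < lo, i < ps.length → ps.getD i 0 < target)
    (h2 : ∀ i, hi ≤ i → i < ps.length → ¬ ps.getD i 0 < target) :
    bbLower ps target lo hi ≤ ps.length
      ∧ (∀ i < bbLower ps target lo hi, i < ps.length → ps.getD i 0 < target)
      ∧ (∀ i, bbLower ps target lo hi ≤ i → i < ps.length → ¬ ps.getD i 0 < target) := by
  have hmono : ∀ i j : Nat, i ≤ j → j < ps.length → ps.getD i 0 ≤ ps.getD j 0 := by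
    intro i j hij hj
    rcases Nat.lt_or_ge i j with h | h
    · rw [List.getD_eq_getElem ps 0 (by omega), List.getD_eq_getElem ps 0 hj]
      exact le_of_lt ((List.pairwise_iff_getElem.mp hsort) i j (by omega) hj h)
    · have : i = j := by omega
      subst this; rfl
  clear hsort
  induction hn : hi - lo using Nat.strong_induction_on generalizing lo hi with
  | _ n ih =>
    by_cases hlt : lo < hi
    · rw [bbLower, dif_pos hlt]
      by_cases hm : PySem.List.pyGetD ps (((lo + hi) / 2 : Nat) : Int) 0 < target
      · rw [if_pos hm]
        have hm' : ps.getD ((lo + hi) / 2) 0 < target := by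
          rwa [PySem.List.pyGetD_natCast] at hm
        refine ih (hi - ((lo + hi) / 2 + 1)) (by omega) ((lo + hi) / 2 + 1) hi hhi (by omega) ?_ h2 rfl
        intro i hi' hil
        exact lt_of_le_of_lt (hmono i ((lo + hi) / 2) (by omega) (by omega)) hm'
      · rw [if_neg hm]
        have hm' : ¬ ps.getD ((lo + hi) / 2) 0 < target := by
          rwa [PySem.List.pyGetD_natCast] at hm
        refine ih ((lo + hi) / 2 - lo) (by omega) lo ((lo + hi) / 2) (by omega) (by omega) h1 ?_ rfl
        intro i hge hil hcon
        exact hm' (lt_of_le_of_lt (hmono ((lo + hi) / 2) i hge hil) hcon)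
    · rw [bbLower, dif_neg hlt]
      exact ⟨by omega, h1, fun i hi' hil => h2 i (by omega) hil⟩

-- a drop at a split point of p is dropWhile p
theorem dropWhile_eq_drop (l : List α) (p : α → Bool) (k : Nat) (hk : k ≤ l.length)
    (h1 : ∀ i, (hi : i < k) → (hl : i < l.length) → p l[i])
    (h2 : ∀ (hl : k < l.length), ¬ p l[k]) :
    l.dropWhile p = l.drop k := by
  induction l generalizing k with
  | nil => simp
  | cons x xs ih =>
    cases k with
    | zero =>
      have hx : ¬ p x := by simpa using h2 (by simp)
      simp [hx]
    | succ n =>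
      have hx : p x := by simpa using h1 0 (by omega) (by simp)
      simp only [List.dropWhile_cons, hx, if_pos, List.drop_succ_cons]
      exact ih n (by simpa using hk)
        (fun i hi hl => by simpa using h1 (i + 1) (by omega) (by simpa using hl))
        (fun hl => by simpa using h2 (by simpa using hl))

-- the scan-while loop folds over the ≤ j prefix of the remaining suffix
theorem bbScan_eq (ps : List Int) (j : Int) (t : PySem.Dict Int Int) (lo : Nat) :
    bbScan ps j t lo
      = ((ps.drop lo).takeWhile (fun p => decide (p ≤ j))).foldl
          (fun t p => t.modify (j - p) 0 (· + 1)) t := by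
  induction hn : ps.length - lo using Nat.strong_induction_on generalizing t lo with
  | _ n ih =>
    rw [bbScan]
    by_cases hcond : lo < ps.length ∧ PySem.List.pyGetD ps (lo : Int) 0 ≤ j
    · rw [dif_pos hcond]
      obtain ⟨hlo, hle⟩ := hcond
      rw [PySem.List.pyGetD_natCast] at hle
      rw [List.getD_eq_getElem ps 0 hlo] at hle
      have hdrop : ps.drop lo = ps[lo] :: ps.drop (lo + 1) := List.drop_eq_getElem_cons hlo
      rw [hdrop, List.takeWhile_cons, if_pos (decide_eq_true hle), List.foldl_cons]
      rw [ih (ps.length - (lo + 1)) (by omega) _ (lo + 1) rfl]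
      congr 2
      rw [PySem.List.pyGetD_natCast, List.getD_eq_getElem ps 0 hlo]
    · rw [dif_neg hcond]
      rcases Nat.lt_or_ge lo ps.length with hlo | hlo
      · have hgt : ¬ ps[lo] ≤ j := by
          intro hle
          exact hcond ⟨hlo, by rwa [PySem.List.pyGetD_natCast, List.getD_eq_getElem ps 0 hlo]⟩
        rw [List.drop_eq_getElem_cons hlo, List.takeWhile_cons,
            if_neg (by simpa using hgt), List.foldl_nil]
      · rw [List.drop_of_length_le hlo]
        rfl

-- on a sorted list, takeWhile of a downward-closed predicate is filter
theorem takeWhile_sorted_eq_filter (l : List Int) (j : Int) (hs : l.Pairwise (· < ·)) :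
    l.takeWhile (fun p => decide (p ≤ j)) = l.filter (fun p => decide (p ≤ j)) := by
  induction l with
  | nil => rfl
  | cons x xs ih =>
    rcases List.pairwise_cons.mp hs with ⟨hx, hxs⟩
    by_cases h : x ≤ j
    · simp only [List.takeWhile_cons, List.filter_cons, decide_eq_true h, if_pos, ih hxs]
    · rw [List.takeWhile_cons, if_neg (by simpa using h), List.filter_cons,
          if_neg (by simpa using h), List.filter_eq_nil_iff.mpr]
      intro y hy
      simp only [decide_eq_true_eq]
      have := hx y hy
      omega

-- on a sorted list, dropWhile of an upward-closed negation is filter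
theorem dropWhile_sorted_eq_filter (l : List Int) (a : Int) (hs : l.Pairwise (· < ·)) :
    l.dropWhile (fun p => decide (p < a)) = l.filter (fun p => decide (¬ p < a)) := by
  induction l with
  | nil => rfl
  | cons x xs ih =>
    rcases List.pairwise_cons.mp hs with ⟨hx, hxs⟩
    by_cases h : x < a
    · rw [List.dropWhile_cons, if_pos (decide_eq_true h), List.filter_cons,
          if_neg (by simpa using h), ih hxs]
    · rw [List.dropWhile_cons, if_neg (by simpa using h), List.filter_cons,
          if_pos (by simpa using h), List.filter_eq_self.mpr]
      intro y hy
      simp only [decide_eq_true_eq]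
      have := hx y hy
      omega

theorem bbTally_eq_foldl (g pt : List Char) (diff : Int) :
    bbTally g (bbIdx pt) diff
      = (pvBig g pt diff).foldl (fun t i => t.modify i 0 (· + 1)) PySem.Dict.empty := by
  unfold bbTally pvBig
  rw [List.foldl_flatMap]
  refine PySem.List.foldl_congr_mem _ _ _ _ ?_
  intro acc jc _
  simp only [bbIdx_getD]
  have hs := pairwise_pvPos pt jc.2
  set ps := pvPos pt jc.2 with hps
  obtain ⟨hk1, hk2, hk3⟩ := bbLower_spec ps (jc.1 - diff) 0 ps.length hs le_rfl (Nat.zero_le _)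
    (by omega) (by intro i hi hil; omega)
  have hdrop : ps.dropWhile (fun p => decide (p < jc.1 - diff))
      = ps.drop (bbLower ps (jc.1 - diff) 0 ps.length) := by
    apply dropWhile_eq_drop ps _ _ hk1
    · intro i hi hil
      have := hk2 i hi hil
      rw [List.getD_eq_getElem ps 0 hil] at this
      exact decide_eq_true this
    · intro hl
      have := hk3 _ le_rfl hl
      rw [List.getD_eq_getElem ps 0 hl] at this
      simpa using this
  rw [bbScan_eq, ← hdrop, dropWhile_sorted_eq_filter ps (jc.1 - diff) hs,
      takeWhile_sorted_eq_filter _ jc.1 ((hs.filter _)),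
      List.filter_filter]
  rw [List.filter_congr (l := ps)
        (q := fun p => decide (0 ≤ jc.1 - p ∧ jc.1 - p ≤ diff))
        (by intro p _
            rw [← Bool.decide_and, decide_eq_decide]
            constructor
            · rintro ⟨h1, h2⟩; omega
            · rintro ⟨h1, h2⟩; exact ⟨by omega, by omega⟩),
      List.foldl_map]

theorem sum_map_eq_countP {α : Type} (l : List α) (q : α → Bool) (f : α → Nat)
    (h : ∀ x, f x = if q x then 1 else 0) : (l.map f).sum = l.countP q := by
  induction l with
  | nil => rfl
  | cons x xs ih =>
    simp only [List.map_cons, List.sum_cons, List.countP_cons, ih, h x]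
    split_ifs <;> omega

theorem count_pvBig (g pt : List Char) (diff i : Int)
    (hdiff : diff = (g.length : Int) - (pt.length : Int))
    (h0 : 0 ≤ i) (hd : i ≤ diff) :
    (pvBig g pt diff).count i
      = (PySem.List.pyRange 0 ((pt.length : Int)) 1).countP
          (fun pos => PySem.List.pyGetD pt pos ' ' == PySem.List.pyGetD g (pos + i) ' ') := by
  unfold pvBig
  rw [List.count_flatMap]
  have hmap : ∀ jc : Int × Char,
      (List.count i ∘ fun jc => ((pvPos pt jc.2).filter
          (fun p => decide (0 ≤ jc.1 - p ∧ jc.1 - p ≤ diff))).map (fun p => jc.1 - p)) jc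
        = if (jc.1 - i) ∈ pvPos pt jc.2 then 1 else 0 := by
    intro jc
    have h1 := List.count_map_of_injective
      ((pvPos pt jc.2).filter (fun p => decide (0 ≤ jc.1 - p ∧ jc.1 - p ≤ diff)))
      (fun p => jc.1 - p) sub_right_injective (jc.1 - i)
    simp only [sub_sub_cancel] at h1
    simp only [Function.comp_apply, h1]
    rw [List.count_filter (by simp only [sub_sub_cancel]; exact decide_eq_true ⟨h0, hd⟩)]
    by_cases hm : (jc.1 - i) ∈ pvPos pt jc.2
    · rw [List.count_eq_one_of_mem (nodup_pvPos pt jc.2) hm, if_pos hm]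
    · rw [List.count_eq_zero_of_not_mem hm, if_neg hm]
  rw [List.map_congr_left (fun jc _ => hmap jc),
      sum_map_eq_countP (PySem.List.enumerate g 0)
        (fun jc => decide ((jc.1 - i) ∈ pvPos pt jc.2))
        (fun jc => if (jc.1 - i) ∈ pvPos pt jc.2 then 1 else 0)
        (fun jc => by by_cases h : (jc.1 - i) ∈ pvPos pt jc.2 <;> simp [h]),
      PySem.List.enumerate_eq_map_pyRange g ' ', List.countP_map]
  have hsplit : PySem.List.pyRange 0 (PySem.List.len g) 1
      = PySem.List.pyRange 0 i 1
        ++ (PySem.List.pyRange i (i + (pt.length : Int)) 1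
            ++ PySem.List.pyRange (i + (pt.length : Int)) (PySem.List.len g) 1) := by
    rw [PySem.List.pyRange_one_append 0 i (PySem.List.len g)
          (by omega) (by simp [PySem.List.len]; omega),
        PySem.List.pyRange_one_append i (i + (pt.length : Int)) (PySem.List.len g)
          (by omega) (by simp [PySem.List.len]; omega)]
  rw [hsplit, List.countP_append, List.countP_append]
  have hz1 : (PySem.List.pyRange 0 i 1).countP
      ((fun jc => decide ((jc.1 - i) ∈ pvPos pt jc.2)) ∘ fun j => (j, PySem.List.pyGetD g j ' ')) = 0 := by
    rw [List.countP_eq_zero]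
    intro a ha
    rcases PySem.List.mem_pyRange_one.mp ha with ⟨ha0, ha1⟩
    simp only [Function.comp_apply, decide_eq_true_eq, mem_pvPos]
    omega
  have hz2 : (PySem.List.pyRange (i + (pt.length : Int)) (PySem.List.len g) 1).countP
      ((fun jc => decide ((jc.1 - i) ∈ pvPos pt jc.2)) ∘ fun j => (j, PySem.List.pyGetD g j ' ')) = 0 := by
    rw [List.countP_eq_zero]
    intro a ha
    rcases PySem.List.mem_pyRange_one.mp ha with ⟨ha0, ha1⟩
    simp only [Function.comp_apply, decide_eq_true_eq, mem_pvPos]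
    omega
  rw [hz1, hz2, Nat.zero_add, Nat.add_zero]
  rw [PySem.List.pyRange_one i (i + (pt.length : Int)), PySem.List.pyRange_zero_natCast]
  rw [List.countP_map, List.countP_map,
      show (i + (pt.length : Int) - i).toNat = pt.length by omega]
  apply List.countP_congr
  intro k hk
  have hkm : k < pt.length := List.mem_range.mp hk
  simp only [Function.comp_apply, add_sub_cancel_left, decide_eq_true_eq, mem_pvPos]
  constructor
  · rintro ⟨-, -, hget⟩
    rw [add_comm] at hget
    exact beq_iff_eq.mpr hget
  · intro hbeq
    refine ⟨by positivity, by exact_mod_cast hkm, ?_⟩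
    rw [add_comm]
    exact beq_iff_eq.mp hbeq

-- the tally of shift i equals A's overlap count at shift i
theorem bbTally_getD (g pt : List Char) (diff i : Int)
    (hdiff : diff = (g.length : Int) - (pt.length : Int))
    (h0 : 0 ≤ i) (hd : i ≤ diff) :
    (bbTally g (bbIdx pt) diff).getD i 0 = baOverlap pt g i := by
  rw [bbTally_eq_foldl, PySem.Dict.getD_foldl_modify_add_one, PySem.Dict.getD_empty,
      count_pvBig g pt diff i hdiff h0 hd]
  unfold baOverlap
  rw [PySem.List.foldl_if_add_one
        (p := fun pos => PySem.List.pyGetD pt pos ' ' == PySem.List.pyGetD g (pos + i) ' ')]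

theorem argmax_swap (l : List Int) (f : Int → Int) : ∀ (a b : Int),
    (l.foldl (fun s i => if f i > s.2 then (i, f i) else s) (b, a)).1
      = (l.foldl (fun s i => if f i > s.1 then (f i, i) else s) (a, b)).2 := by
  induction l with
  | nil => intro a b; rfl
  | cons x xs ih =>
    intro a b
    simp only [List.foldl_cons]
    by_cases h : f x > a
    · simpa [h] using ih (f x) x
    · simpa [h] using ih a b

-- ===== VERDICT (by name: the statement is the Claim_ definition above) =====
theorem best_alignment_spec : Claim_equal_best_alignment := by
  intro genome pattern _
  unfold Spec_best_alignment best_alignment best_alignment_alt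
  dsimp only
  set g := genome.toList with hg
  set pt := pattern.toList with hpt
  set diff : Int := (g.length : Int) - (pt.length : Int) with hdiff
  rw [PySem.List.foldl_congr_mem (PySem.List.pyRange 0 (diff + 1) 1)
        (fun (s : Int × Int) i =>
          let v := (bbTally g (bbIdx pt) diff).getD i 0
          if v > s.2 then (i, v) else s)
        (fun (s : Int × Int) i =>
          if baOverlap pt g i > s.2 then (i, baOverlap pt g i) else s)
        ((0 : Int), (0 : Int))
        (by
          intro acc x hx
          rcases PySem.List.mem_pyRange_one.mp hx with ⟨hx0, hx1⟩
          simp only [bbTally_getD g pt diff x hdiff hx0 (by omega)])]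
  exact (argmax_swap (PySem.List.pyRange 0 (diff + 1) 1) (fun i => baOverlap pt g i) 0 0).symm
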